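-- pv_equiv track=rewrite | github.com/goodwordalchemy/coding_competitions | kickstartF2021/festival3.py | solution
-- ===== SOURCE A (Python) =====
-- class BIT(object):	# 0-indexed.
-- 	def __init__(self, n):
-- 		self.__bit = [0]*(n+1)	# Extra one for dummy node.
--
-- 	def add(self, i, val):
-- 		i += 1	# Extra one for dummy node.
-- 		while i < len(self.__bit):
-- 			self.__bit[i] += val
-- 			i += (i & -i)
--
-- 	def query(self, i):
-- 		i += 1	# Extra one for dummy node.
-- 		ret = 0
-- 		while i > 0:
-- 			ret += self.__bit[i]
-- 			i -= (i & -i)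
-- 		return ret
--
-- 	def kth_element(self, k):
-- 		floor_log2_n = (len(self.__bit)-1).bit_length()-1
-- 		pow_i = 2**floor_log2_n
-- 		total = pos = 0  # 1-indexed
-- 		for _ in reversed(range(floor_log2_n+1)):	# O(logN)
-- 			if pos+pow_i < len(self.__bit) and total+self.__bit[pos+pow_i] < k:  # find max pos s.t. total < k
-- 				total += self.__bit[pos+pow_i]
-- 				pos += pow_i
-- 			pow_i >>= 1
-- 		return (pos+1)-1  # 0-indexed, return min pos s.t. total >= k if pos exists else n
--
-- def solution(D, K, rides):
-- 	line_sweep = []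
-- 	hs = []
-- 	for i, (h, s, e) in enumerate(rides):
-- 		line_sweep.append((s, 1, h, i))
-- 		line_sweep.append((e+1, -1, h, i))
-- 		hs.append((h, i))
--
-- 	hs.sort(reverse=True)
-- 	line_sweep.sort()
--
-- 	idx_to_rank = {i: rank for rank, (_, i) in enumerate(hs)}
--
-- 	enabled = BIT(len(rides))
-- 	scores = BIT(len(rides))
-- 	# enabled = SegmentTree([0]*len(rides))
-- 	# scores = SegmentTree([0]*len(rides))
--
-- 	result = 0
-- 	for _, type_, h, i in line_sweep:
-- 		if type_ == 1:
-- 			enabled.add(idx_to_rank[i], 1)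
-- 			scores.add(idx_to_rank[i], h)
-- 			idx = enabled.kth_element(K)
-- 			idx = min(idx, len(rides) - 1)
--
-- 			result = max(result, scores.query(idx))
-- 		else:
-- 			enabled.add(idx_to_rank[i], -1)
-- 			scores.add(idx_to_rank[i], -h)
--
-- 	return result
-- ===== SOURCE B (Python) =====
-- def solution(D, K, rides):
--     # Same line sweep over (h, s, e) rides, but the two Fenwick (BIT) trees are
--     # replaced by plain per-rank count/score arrays: point updates are direct,
--     # and on each addition the prefix sums are rebuilt by one linear scan and
--     # the K-th position is found by a binary descent over that prefix array.
--     n = len(rides)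
--     events = sorted([ev for i, (h, s, e) in enumerate(rides)
--                      for ev in ((s, 1, h, i), (e + 1, -1, h, i))])
--     hs = sorted([(h, i) for i, (h, s, e) in enumerate(rides)], reverse=True)
--     rank = {i: r for r, (_, i) in enumerate(hs)}
--     cnt = [0] * n
--     sc = [0] * n
--     result = 0
--     for _, typ, h, i in events:
--         r = rank[i]
--         cnt[r] += typ
--         sc[r] += typ * h
--         if typ == 1:
--             P = [0] * (n + 1)
--             S = [0] * (n + 1)
--             for j in range(n):
--                 P[j + 1] = P[j] + cnt[j]
--                 S[j + 1] = S[j] + sc[j]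
--             pos = 0
--             pw = 1 << (n.bit_length() - 1)
--             while pw:
--                 if pos + pw <= n and P[pos + pw] < K:
--                     pos += pw
--                 pw >>= 1
--             idx = min(pos, n - 1)
--             result = max(result, S[idx + 1])
--     return result
-- ===== Notes on version B (the rewrite author's own statement) =====
-- stated objective: simpler
-- what changed: The two Fenwick (BIT) trees with their bit-twiddling add/query chains are replaced by plain per-rank count/score arrays with O(1) point updates; on each addition the prefix sums are rebuilt by one linear scan and the K-th position is found by a single binary descent over that explicit prefix array.
import Mathlib
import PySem

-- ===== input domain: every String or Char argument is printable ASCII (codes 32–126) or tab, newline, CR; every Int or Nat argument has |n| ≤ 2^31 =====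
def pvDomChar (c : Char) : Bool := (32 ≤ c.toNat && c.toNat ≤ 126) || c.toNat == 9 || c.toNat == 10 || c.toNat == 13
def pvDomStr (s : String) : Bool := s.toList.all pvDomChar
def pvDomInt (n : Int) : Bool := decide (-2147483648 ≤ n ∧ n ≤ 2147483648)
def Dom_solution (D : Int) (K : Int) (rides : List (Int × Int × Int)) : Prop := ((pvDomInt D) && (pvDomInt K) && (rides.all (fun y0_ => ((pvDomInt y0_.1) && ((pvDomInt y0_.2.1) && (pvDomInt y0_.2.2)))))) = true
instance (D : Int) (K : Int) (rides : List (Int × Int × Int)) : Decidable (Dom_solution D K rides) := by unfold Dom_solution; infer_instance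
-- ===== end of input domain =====

-- B replaces A's two Fenwick (BIT) trees by plain per-rank count/score arrays:
-- point updates are direct, prefix sums are rebuilt by one linear scan per
-- addition and the K-th position is found by a binary descent over that
-- explicit prefix array (objective: simpler; not faster).

-- ===== PORT A =====

-- `i & -i` (the lowest set bit of i; 0 for i = 0), written by halving recursion
def lowbit (i : Nat) : Nat :=
  if h : i = 0 then 0 else if i % 2 = 1 then 1 else 2 * lowbit (i / 2)
decreasing_by omega

theorem lowbit_pos {i : Nat} (h : 0 < i) : 0 < lowbit i := by
  induction i using Nat.strong_induction_on with
  | _ i ih =>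
    rw [lowbit]
    rcases Nat.eq_zero_or_pos i with h0 | h0
    · omega
    · rw [dif_neg (by omega)]
      by_cases hpar : i % 2 = 1
      · simp [hpar]
      · rw [if_neg hpar]
        have := ih (i / 2) (by omega) (by omega)
        omega

-- Python sorts the 4-tuples (time, type, h, i) lexicographically; every
-- component here has absolute value < 2^64 (Dom bounds the ints by 2^31 and i
-- is a list index), so this packed integer key induces exactly that order and
-- ties only between equal tuples.
def packKey (ev : Int × Int × Int × Int) : Int :=
  ((ev.1 * 18446744073709551616 + ev.2.1) * 18446744073709551616 + ev.2.2.1) *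
      18446744073709551616 + ev.2.2.2

-- class BIT: the list self.__bit (length N = n+1) is ported as a function Nat → Int
def bitAddLoop (N : Nat) (v : Int) (b : Nat → Int) (i : Nat) : Nat → Int :=
  if h : 0 < i ∧ i < N then
    bitAddLoop N v (Function.update b i (b i + v)) (i + lowbit i)
  else b
termination_by N - i
decreasing_by have := lowbit_pos h.1; omega

-- BIT.add(i, val)  (the loop index i+1 is always ≥ 1; the 0 < i guard only totalizes)
def bitAdd (N : Nat) (b : Nat → Int) (i : Nat) (v : Int) : Nat → Int :=
  bitAddLoop N v b (i + 1)

def bitQueryLoop (b : Nat → Int) (ret : Int) (i : Nat) : Int :=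
  if h : 0 < i then bitQueryLoop b (ret + b i) (i - lowbit i) else ret
termination_by i
decreasing_by have := lowbit_pos h; omega

-- BIT.query(i)
def bitQuery (b : Nat → Int) (i : Nat) : Int := bitQueryLoop b 0 (i + 1)

-- the `for _ in reversed(range(floor_log2_n+1))` loop of BIT.kth_element
def kthLoop (N : Nat) (b : Nat → Int) (k : Int) : Nat → Nat → Int → Nat → Nat
  | 0, _, _, pos => pos
  | t + 1, pow, total, pos =>
    if pos + pow < N ∧ total + b (pos + pow) < k then
      kthLoop N b k t (pow >>> 1) (total + b (pos + pow)) (pos + pow)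
    else
      kthLoop N b k t (pow >>> 1) total pos

-- BIT.kth_element(k); floor_log2_n = (N-1).bit_length()-1.  When N-1 = 0 the
-- loop runs 0 times and Python's pow_i = 2**-1 (a float) is never read; the
-- port uses 2^0 there, equally unread.
def bitKth (N : Nat) (b : Nat → Int) (k : Int) : Nat :=
  let fl : Int := (PySem.Int.bitLength ((N : Int) - 1) : Int) - 1
  kthLoop N b k (fl + 1).toNat (2 ^ fl.toNat) 0 0

-- body of A's `for _, type_, h, i in line_sweep` loop; state (enabled, scores, result)
def stepA (N n : Nat) (K : Int) (d : PySem.Dict Int Int)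
    (st : (Nat → Int) × (Nat → Int) × Int) (ev : Int × Int × Int × Int) :
    (Nat → Int) × (Nat → Int) × Int :=
  let r := (d.getD ev.2.2.2 0).toNat   -- idx_to_rank[i]; the key is always present
  if ev.2.1 = 1 then
    let be := bitAdd N st.1 r 1
    let bs := bitAdd N st.2.1 r ev.2.2.1
    let idx := min (bitKth N be K) (n - 1)   -- min(idx, len(rides)-1), n ≥ 1 at every reachable call
    (be, bs, max st.2.2 (bitQuery bs idx))
  else
    (bitAdd N st.1 r (-1), bitAdd N st.2.1 r (-ev.2.2.1), st.2.2)

def solution (D : Int) (K : Int) (rides : List (Int × Int × Int)) : Int :=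
  -- the single for-loop builds line_sweep and hs together
  let built := (PySem.List.enumerate rides).foldl
      (fun (acc : List (Int × Int × Int × Int) × List (Int × Int)) p =>
        (acc.1 ++ [(p.2.2.1, 1, p.2.1, p.1), (p.2.2.2 + 1, -1, p.2.1, p.1)],
         acc.2 ++ [(p.2.1, p.1)]))
      ([], [])
  -- hs.sort(reverse=True): Python compares the int pairs (h, i) lexicographically
  let hs := PySem.List.sorted2 built.2 (fun x => x.1) (fun x => x.2) true
  let lineSweep := PySem.List.sorted built.1 packKey false
  let idxToRank := (PySem.List.enumerate hs).foldl
      (fun (d : PySem.Dict Int Int) p => d.insert p.2.2 p.1) PySem.Dict.empty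
  (lineSweep.foldl (stepA (rides.length + 1) rides.length K idxToRank)
      ((fun _ => 0), (fun _ => 0), 0)).2.2

-- ===== PORT B =====

-- the P/S-building loop `P[j+1] = P[j] + cnt[j]` as a recursive prefix function
def prefixes (a : Nat → Int) : Nat → Int
  | 0 => 0
  | j + 1 => prefixes a j + a j

-- B's `while pw:` binary descent over the explicit prefix array
def descend (n : Nat) (P : Nat → Int) (k : Int) (pos pw : Nat) : Nat :=
  if h : 0 < pw then
    descend n P k (if pos + pw ≤ n ∧ P (pos + pw) < k then pos + pw else pos) (pw / 2)
  else pos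
termination_by pw
decreasing_by omega

-- body of B's event loop; state (cnt, sc, result), the two lists as functions
def stepB (n : Nat) (K : Int) (d : PySem.Dict Int Int)
    (st : (Nat → Int) × (Nat → Int) × Int) (ev : Int × Int × Int × Int) :
    (Nat → Int) × (Nat → Int) × Int :=
  let r := (d.getD ev.2.2.2 0).toNat   -- rank[i]; the key is always present
  let cnt := Function.update st.1 r (st.1 r + ev.2.1)
  let sc := Function.update st.2.1 r (st.2.1 r + ev.2.1 * ev.2.2.1)
  if ev.2.1 = 1 then
    let P := prefixes cnt
    let S := prefixes sc
    let pw := 1 <<< ((PySem.Int.bitLength (n : Int) : Int) - 1).toNat  -- 1 << (n.bit_length()-1), n ≥ 1 when reached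
    let idx := min (descend n P K 0 pw) (n - 1)
    (cnt, sc, max st.2.2 (S (idx + 1)))
  else
    (cnt, sc, st.2.2)

def solution_alt (D : Int) (K : Int) (rides : List (Int × Int × Int)) : Int :=
  let lineSweep := PySem.List.sorted
      ((PySem.List.enumerate rides).flatMap
        (fun p => [(p.2.2.1, 1, p.2.1, p.1), (p.2.2.2 + 1, -1, p.2.1, p.1)]))
      packKey false
  let hs := PySem.List.sorted2 ((PySem.List.enumerate rides).map (fun p => (p.2.1, p.1)))
      (fun x => x.1) (fun x => x.2) true
  let rank := (PySem.List.enumerate hs).foldl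
      (fun (d : PySem.Dict Int Int) p => d.insert p.2.2 p.1) PySem.Dict.empty
  (lineSweep.foldl (stepB rides.length K rank) ((fun _ => 0), (fun _ => 0), 0)).2.2

-- ===== PRECONDITION & SPEC =====
def Spec_solution (D : Int) (K : Int) (rides : List (Int × Int × Int)) (out : Int) : Prop := out = solution_alt D K rides
instance (D : Int) (K : Int) (rides : List (Int × Int × Int)) (out : Int) : Decidable (Spec_solution D K rides out) := by unfold Spec_solution; infer_instance

-- ===== CLAIM (what is proved, stated in full; the proofs are below) =====
def Claim_equal_solution : Prop := ∀ (D : Int) (K : Int) (rides : List (Int × Int × Int)), Dom_solution D K rides → Spec_solution D K rides (solution D K rides)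

-- ===== LEMMAS AND PROOFS =====

theorem lowbit_le {i : Nat} : lowbit i ≤ i := by
  induction i using Nat.strong_induction_on with
  | _ i ih =>
    rw [lowbit]
    rcases Nat.eq_zero_or_pos i with h0 | h0
    · simp [h0]
    · rw [dif_neg (by omega)]
      by_cases hpar : i % 2 = 1
      · simp [hpar]; omega
      · rw [if_neg hpar]
        have := ih (i / 2) (by omega)
        omega

theorem lowbit_two_pow (j : Nat) : lowbit (2 ^ j) = 2 ^ j := by
  induction j with
  | zero => rw [lowbit]; norm_num
  | succ j ih =>
    rw [lowbit, dif_neg (by positivity)]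
    rw [if_neg (by omega), Nat.pow_succ]
    have h2 : 2 ^ j * 2 / 2 = 2 ^ j := by omega
    rw [h2, ih]; ring

theorem lowbit_even {i : Nat} (h0 : i ≠ 0) (h : i % 2 = 0) :
    lowbit i = 2 * lowbit (i / 2) := by
  rw [lowbit, dif_neg h0, if_neg (by omega)]

theorem lowbit_odd {i : Nat} (h : i % 2 = 1) : lowbit i = 1 := by
  rw [lowbit, dif_neg (by omega), if_pos h]

theorem lowbit_add : ∀ {m d : Nat}, 0 < d → d < lowbit m → lowbit (m + d) = lowbit d := by
  intro m
  induction m using Nat.strong_induction_on with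
  | _ m ih =>
    intro d hd h
    rcases Nat.eq_zero_or_pos m with h0 | h0
    · rw [h0, lowbit] at h; simp at h
    · by_cases hpar : m % 2 = 1
      · rw [lowbit_odd hpar] at h; omega
      · rw [lowbit_even (by omega) (by omega)] at h
        by_cases hdp : d % 2 = 1
        · rw [lowbit_odd (by omega), lowbit_odd hdp]
        · have hd2 : 0 < d / 2 := by omega
          have hlt : d / 2 < lowbit (m / 2) := by omega
          have heq : (m + d) / 2 = m / 2 + d / 2 := by omega
          rw [lowbit_even (by omega) (by omega), heq,
            ih (m / 2) (by omega) hd2 hlt, ← lowbit_even (by omega) (by omega)]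

theorem two_pow_dvd_le_lowbit : ∀ (k : Nat) {m : Nat}, 0 < m → 2 ^ k ∣ m →
    2 ^ k ≤ lowbit m := by
  intro k
  induction k with
  | zero => intro m hm _; simpa using lowbit_pos hm
  | succ k ih =>
    intro m hm hdvd
    have h2 : 2 ∣ m := dvd_trans (by norm_num [Nat.pow_succ]) hdvd
    have hpar : m % 2 = 0 := Nat.mod_eq_zero_of_dvd h2
    have hhalf : 2 ^ k ∣ m / 2 := by
      obtain ⟨c, hc⟩ := hdvd
      have hc' : m = 2 * (2 ^ k * c) := by rw [hc, Nat.pow_succ]; ring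
      exact ⟨c, by omega⟩
    have := ih (m := m / 2) (by omega) hhalf
    rw [lowbit_even (by omega) hpar, Nat.pow_succ]
    omega

theorem lowbit_step : ∀ {j : Nat}, 0 < j → 2 * lowbit j ≤ lowbit (j + lowbit j) := by
  intro j
  induction j using Nat.strong_induction_on with
  | _ j ih =>
    intro hj
    by_cases hpar : j % 2 = 1
    · rw [lowbit_odd hpar, lowbit_even (by omega) (by omega)]
      have := lowbit_pos (i := (j + 1) / 2) (by omega)
      omega
    · have hhalf : 0 < j / 2 := by omega
      have ihh := ih (j / 2) (by omega) hhalf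
      have hle := lowbit_le (i := j / 2)
      have hl1 : lowbit j = 2 * lowbit (j / 2) := lowbit_even (by omega) (by omega)
      have hl2 : lowbit (j + lowbit j) = 2 * lowbit (j / 2 + lowbit (j / 2)) := by
        rw [hl1]
        have heq : j + 2 * lowbit (j / 2) = 2 * (j / 2 + lowbit (j / 2)) := by omega
        rw [heq, lowbit_even (by omega) (by omega)]
        have h22 : 2 * (j / 2 + lowbit (j / 2)) / 2 = j / 2 + lowbit (j / 2) := by omega
        rw [h22]
      rw [hl2, hl1]
      omega

-- the set of BIT nodes the add-loop from p touches
def inChain (N p j : Nat) : Bool :=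
  if h : 0 < p ∧ p < N then j == p || inChain N (p + lowbit p) j else false
termination_by N - p
decreasing_by have := lowbit_pos h.1; omega

theorem chain_ge {N p j : Nat} : inChain N p j → p ≤ j := by
  induction p using inChain.induct (N := N) with
  | case1 p hg ih =>
    intro h
    rw [inChain, dif_pos hg] at h
    simp at h
    rcases h with h | h
    · omega
    · have := ih h
      omega
  | case2 p hg =>
    intro h
    rw [inChain, dif_neg hg] at h
    simp at h

theorem chain_lt {N p j : Nat} : inChain N p j → j < N := by
  induction p using inChain.induct (N := N) with
  | case1 p hg ih =>
    intro h
    rw [inChain, dif_pos hg] at h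
    simp at h
    rcases h with h | h
    · omega
    · exact ih h
  | case2 p hg =>
    intro h
    rw [inChain, dif_neg hg] at h
    simp at h

theorem chain_m {N p j : Nat} : inChain N p j → j - lowbit j ≤ p - lowbit p := by
  induction p using inChain.induct (N := N) with
  | case1 p hg ih =>
    intro h
    rw [inChain, dif_pos hg] at h
    simp at h
    rcases h with h | h
    · subst h; exact le_rfl
    · have h1 := ih h
      have h2 := lowbit_step hg.1
      have h3 := lowbit_le (i := p)
      omega
  | case2 p hg =>
    intro h
    rw [inChain, dif_neg hg] at h
    simp at h

theorem cover_chain {N j : Nat} : ∀ d p, j - p = d → 0 < p → p ≤ j → j < N →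
    j - lowbit j < p → inChain N p j := by
  intro d
  induction d using Nat.strong_induction_on with
  | _ d ih =>
    intro p hd hp hpj hjN hcov
    rw [inChain, dif_pos ⟨hp, by omega⟩]
    simp
    by_cases hej : j = p
    · exact Or.inl (by omega)
    · right
      have hlbp := lowbit_pos hp
      have hstep : p + lowbit p ≤ j := by
        by_contra hcon
        push Not at hcon
        have hd0 : 0 < j - p := by omega
        have hlj : lowbit j = lowbit (j - p) := by
          calc lowbit j = lowbit (p + (j - p)) := by congr 1; omega
            _ = lowbit (j - p) := lowbit_add hd0 (by omega)
        have hlb := lowbit_le (i := j - p)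
        omega
      exact ih (j - (p + lowbit p)) (by omega) (p + lowbit p) rfl (by omega) hstep hjN
        (by omega)

theorem chain_iff {N p j : Nat} (hp : 0 < p) :
    inChain N p j ↔ (p ≤ j ∧ j < N ∧ j - lowbit j < p) := by
  constructor
  · intro h
    refine ⟨chain_ge h, chain_lt h, ?_⟩
    have h1 := chain_m h
    have h2 := lowbit_pos hp
    omega
  · rintro ⟨h1, h2, h3⟩; exact cover_chain (j - p) p rfl hp h1 h2 h3

theorem addLoop_apply (N : Nat) (v : Int) :
    ∀ p (b : Nat → Int) (j : Nat),
      bitAddLoop N v b p j = b j + (if inChain N p j then v else 0) := by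
  intro p b j
  induction b, p using bitAddLoop.induct (N := N) (v := v) with
  | case1 b p hg ih =>
    have hun : inChain N p j = (j == p || inChain N (p + lowbit p) j) := by
      rw [inChain, dif_pos hg]
    rw [bitAddLoop, dif_pos hg, ih, hun]
    by_cases hej : j = p
    · subst hej
      have hnc : ¬ inChain N (j + lowbit j) j := by
        intro hc
        have := chain_ge hc
        have := lowbit_pos hg.1
        omega
      simp [hnc, Function.update_self]
    · rw [Function.update_of_ne hej]
      simp [hej]
  | case2 b p hg =>
    rw [bitAddLoop, dif_neg hg, inChain, dif_neg hg]
    simp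

theorem prefixes_update (a : Nat → Int) (r : Nat) (v : Int) :
    ∀ p, prefixes (Function.update a r (a r + v)) p
        = prefixes a p + (if r < p then v else 0) := by
  intro p
  induction p with
  | zero => simp [prefixes]
  | succ p ih =>
    rw [prefixes, prefixes, ih, Function.update_apply]
    by_cases hrp : p = r
    · subst hrp
      rw [if_pos rfl, if_neg (lt_irrefl p), if_pos (Nat.lt_succ_self p)]
      ring
    · rw [if_neg hrp]
      by_cases hlt : r < p
      · rw [if_pos hlt, if_pos (by omega)]; ring
      · rw [if_neg hlt, if_neg (by omega)]; ring

theorem prefixes_zero : ∀ p, prefixes (fun _ => 0) p = 0 := by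
  intro p; induction p with
  | zero => rfl
  | succ p ih => simp [prefixes, ih]

-- the representation invariant: bit j stores the range sum (j - lowbit j, j]
def BitInv (N : Nat) (a b : Nat → Int) : Prop :=
  ∀ j, 1 ≤ j → j < N → b j = prefixes a j - prefixes a (j - lowbit j)

theorem inv_add {n : Nat} {a b : Nat → Int} (hI : BitInv (n + 1) a b) (r : Nat) (v : Int) :
    BitInv (n + 1) (Function.update a r (a r + v)) (bitAdd (n + 1) b r v) := by
  intro j h1 hN
  rw [bitAdd, addLoop_apply, prefixes_update, prefixes_update, hI j h1 hN]
  have hiff := chain_iff (N := n + 1) (p := r + 1) (j := j) (by omega)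
  have hlp := lowbit_pos (i := j) (by omega)
  have hle := lowbit_le (i := j)
  by_cases hch : inChain (n + 1) (r + 1) j
  · have hc := hiff.mp hch
    rw [if_pos hch, if_pos (show r < j by omega),
      if_neg (show ¬ r < j - lowbit j by omega)]
    ring
  · have hnc : ¬ (r + 1 ≤ j ∧ j < n + 1 ∧ j - lowbit j < r + 1) := fun hc => hch (hiff.mpr hc)
    rw [if_neg hch]
    by_cases hrj : r < j
    · rw [if_pos hrj, if_pos (show r < j - lowbit j by omega)]
      ring
    · rw [if_neg hrj, if_neg (show ¬ r < j - lowbit j by omega)]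
      ring

theorem query_eq {n : Nat} {a b : Nat → Int} (hI : BitInv (n + 1) a b) :
    ∀ i, i ≤ n → ∀ ret, bitQueryLoop b ret i = ret + prefixes a i := by
  intro i
  induction i using Nat.strong_induction_on with
  | _ i ih =>
    intro hin ret
    rw [bitQueryLoop]
    rcases Nat.eq_zero_or_pos i with h0 | hp
    · subst h0
      rw [dif_neg (lt_irrefl 0)]
      simp [prefixes]
    · have hlp := lowbit_pos hp
      have hle := lowbit_le (i := i)
      rw [dif_pos hp, ih (i - lowbit i) (by omega) (by omega), hI i hp (by omega)]
      ring

theorem kth_descend {n : Nat} {b P : Nat → Int} {k : Int}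
    (hb : ∀ j, 1 ≤ j → j ≤ n → b j = P j - P (j - lowbit j)) :
    ∀ t pow pos, (t = 0 → pow = 0) → (∀ j, t = j + 1 → pow = 2 ^ j) →
      (∀ j, t = j + 1 → 2 ^ (j + 1) ∣ pos) →
      kthLoop (n + 1) b k t pow (P pos) pos = descend n P k pos pow := by
  intro t
  induction t with
  | zero =>
    intro pow pos h0 _ _
    rw [h0 rfl, kthLoop, descend, dif_neg (lt_irrefl 0)]
  | succ t ih =>
    intro pow pos _ hs hdvd
    have hpow : pow = 2 ^ t := hs t rfl
    have hpw0 : 0 < pow := by rw [hpow]; positivity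
    have hhalf : pow >>> 1 = pow / 2 := Nat.shiftRight_one pow
    have hnext0 : t = 0 → pow / 2 = 0 := by intro h; subst h; rw [hpow]; norm_num
    have hnexts : ∀ j, t = j + 1 → pow / 2 = 2 ^ j := by
      intro j h; subst h; rw [hpow, Nat.pow_succ]; omega
    rw [kthLoop, descend, dif_pos hpw0]
    by_cases hbound : pos + pow ≤ n
    · have hb' : b (pos + pow) = P (pos + pow) - P pos := by
        have hlb : lowbit (pos + pow) = pow := by
          rcases Nat.eq_zero_or_pos pos with hz | hz
          · rw [hz, Nat.zero_add, hpow, lowbit_two_pow]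
          · have hd := hdvd t rfl
            have hlbp := two_pow_dvd_le_lowbit (t + 1) hz hd
            have hppow : pow < lowbit pos := by
              have : (2 : Nat) ^ t < 2 ^ (t + 1) := by
                rw [Nat.pow_succ]; omega
              omega
            rw [lowbit_add hpw0 hppow, hpow, lowbit_two_pow]
        rw [hb (pos + pow) (by omega) hbound, hlb]
        congr 2
        omega
      by_cases hcond : P (pos + pow) < k
      · rw [if_pos ⟨by omega, by rw [hb']; omega⟩, if_pos ⟨hbound, hcond⟩]
        have htot : P pos + b (pos + pow) = P (pos + pow) := by rw [hb']; ring
        rw [htot, hhalf]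
        exact ih (pow / 2) (pos + pow) hnext0 hnexts (by
          intro j h
          have h2 : 2 ^ (j + 1) ∣ pos := by
            have := hdvd t rfl
            subst h
            exact dvd_trans (pow_dvd_pow 2 (by omega)) this
          have h3 : (2 : Nat) ^ (j + 1) ∣ pow := by
            rw [hpow, h]
          exact Nat.dvd_add h2 h3)
      · rw [if_neg (by
            rintro ⟨_, hlt⟩
            rw [hb'] at hlt
            omega), if_neg (by
            rintro ⟨_, hlt⟩
            exact hcond hlt)]
        rw [hhalf]
        exact ih (pow / 2) pos hnext0 hnexts (by
          intro j h
          have := hdvd t rfl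
          subst h
          exact dvd_trans (pow_dvd_pow 2 (by omega)) this)
    · rw [if_neg (by omega), if_neg (by omega), hhalf]
      exact ih (pow / 2) pos hnext0 hnexts (by
        intro j h
        have := hdvd t rfl
        subst h
        exact dvd_trans (pow_dvd_pow 2 (by omega)) this)

theorem bitLength_pos {n : Nat} (hn : 1 ≤ n) : 1 ≤ PySem.Int.bitLength (n : Int) := by
  by_contra h
  have h0 : PySem.Int.bitLength (n : Int) = 0 := by omega
  have := PySem.Int.lt_two_pow_bitLength (n : Int)
  rw [h0] at this
  simp [Int.natAbs_natCast] at this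
  omega

theorem step_eq {n : Nat} (hn : 1 ≤ n) (K : Int) (d : PySem.Dict Int Int)
    (ev : Int × Int × Int × Int) (hev : ev.2.1 = 1 ∨ ev.2.1 = -1)
    (sA sB : (Nat → Int) × (Nat → Int) × Int)
    (h1 : BitInv (n + 1) sB.1 sA.1) (h2 : BitInv (n + 1) sB.2.1 sA.2.1)
    (h3 : sA.2.2 = sB.2.2) :
    BitInv (n + 1) (stepB n K d sB ev).1 (stepA (n + 1) n K d sA ev).1 ∧
    BitInv (n + 1) (stepB n K d sB ev).2.1 (stepA (n + 1) n K d sA ev).2.1 ∧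
    (stepA (n + 1) n K d sA ev).2.2 = (stepB n K d sB ev).2.2 := by
  simp only [stepA, stepB]
  rcases hev with hty | hty
  · rw [hty, if_pos rfl, if_pos rfl]
    have hI1 := inv_add h1 ((d.getD ev.2.2.2 0).toNat) 1
    have hI2 := inv_add h2 ((d.getD ev.2.2.2 0).toNat) ev.2.2.1
    refine ⟨by simpa using hI1, by simpa using hI2, ?_⟩
    -- the K-th index found over the enabled BIT equals the binary descent over the prefix array
    have hL1 : 1 ≤ PySem.Int.bitLength ((n : Nat) : Int) := bitLength_pos hn
    set L := PySem.Int.bitLength ((n : Nat) : Int) with hLdef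
    set cnt' := Function.update sB.1 ((d.getD ev.2.2.2 0).toNat)
        (sB.1 ((d.getD ev.2.2.2 0).toNat) + 1) with hcnt
    set sc' := Function.update sB.2.1 ((d.getD ev.2.2.2 0).toNat)
        (sB.2.1 ((d.getD ev.2.2.2 0).toNat) + 1 * ev.2.2.1) with hsc
    have hkth : bitKth (n + 1) (bitAdd (n + 1) sA.1 ((d.getD ev.2.2.2 0).toNat) 1) K
        = descend n (prefixes cnt') K 0 (1 <<< ((L : Int) - 1).toNat) := by
      rw [bitKth]
      have hcast : (((n + 1 : Nat)) : Int) - 1 = ((n : Nat) : Int) := by push_cast; ring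
      rw [hcast, ← hLdef]
      have ht : (((L : Int) - 1) + 1).toNat = L := by omega
      have hp : ((L : Int) - 1).toNat = L - 1 := by omega
      rw [ht, hp, Nat.one_shiftLeft]
      have hb : ∀ j, 1 ≤ j → j ≤ n →
          (bitAdd (n + 1) sA.1 ((d.getD ev.2.2.2 0).toNat) 1) j
            = prefixes cnt' j - prefixes cnt' (j - lowbit j) := by
        intro j hj1 hjn
        have := hI1 j hj1 (by omega)
        simpa [hcnt] using this
      have := kth_descend (k := K) hb L (2 ^ (L - 1)) 0
        (by intro h0; omega)
        (by intro j hj; congr 1; omega)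
        (by intro j _; exact Dvd.intro 0 rfl)
      simpa [prefixes] using this
    dsimp only
    rw [h3, hkth]
    set idx := min (descend n (prefixes cnt') K 0 (1 <<< ((L : Int) - 1).toNat)) (n - 1)
      with hidx
    have hquery : bitQuery (bitAdd (n + 1) sA.2.1 ((d.getD ev.2.2.2 0).toNat) ev.2.2.1) idx
        = prefixes sc' (idx + 1) := by
      have hb2 : BitInv (n + 1) sc'
          (bitAdd (n + 1) sA.2.1 ((d.getD ev.2.2.2 0).toNat) ev.2.2.1) := by
        intro j hj1 hjn
        have := hI2 j hj1 hjn
        simpa [hsc] using this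
      have hle : idx + 1 ≤ n := by
        have : idx ≤ n - 1 := Nat.min_le_right _ _
        omega
      rw [bitQuery, query_eq hb2 (idx + 1) hle 0]
      ring
    rw [hquery]
  · have hne : ev.2.1 ≠ 1 := by rw [hty]; norm_num
    rw [if_neg hne, if_neg hne]
    have hI1 := inv_add h1 ((d.getD ev.2.2.2 0).toNat) (-1)
    have hI2 := inv_add h2 ((d.getD ev.2.2.2 0).toNat) (-ev.2.2.1)
    refine ⟨by rw [hty]; simpa using hI1, by rw [hty]; simpa [neg_one_mul] using hI2, h3⟩

theorem fold_eq {n : Nat} (hn : 1 ≤ n) (K : Int) (d : PySem.Dict Int Int) :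
    ∀ (evs : List (Int × Int × Int × Int)) sA sB,
      (∀ ev ∈ evs, ev.2.1 = 1 ∨ ev.2.1 = -1) →
      BitInv (n + 1) sB.1 sA.1 → BitInv (n + 1) sB.2.1 sA.2.1 → sA.2.2 = sB.2.2 →
      (evs.foldl (stepA (n + 1) n K d) sA).2.2 = (evs.foldl (stepB n K d) sB).2.2 := by
  intro evs
  induction evs with
  | nil => intro sA sB _ _ _ h3; exact h3
  | cons ev evs ih =>
    intro sA sB hmem h1 h2 h3
    obtain ⟨g1, g2, g3⟩ := step_eq hn K d ev (hmem ev (by simp)) sA sB h1 h2 h3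
    exact ih _ _ (fun e he => hmem e (by simp [he])) g1 g2 g3

theorem foldl_pair {α β γ : Type} (f : β → α → β) (g : γ → α → γ) :
    ∀ (l : List α) (x : β) (y : γ),
      l.foldl (fun acc p => (f acc.1 p, g acc.2 p)) (x, y) = (l.foldl f x, l.foldl g y) := by
  intro l
  induction l with
  | nil => intro x y; rfl
  | cons a l ih =>
    intro x y
    simp only [List.foldl_cons]
    exact ih (f x a) (g y a)

theorem init_inv (n : Nat) : BitInv (n + 1) (fun _ => 0) (fun _ => 0) := by
  intro j _ _
  simp [prefixes_zero]

-- ===== VERDICT (by name: the statement is the Claim_ definition above) =====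
theorem solution_spec : Claim_equal_solution := by
  unfold Claim_equal_solution
  intro D K rides _
  unfold Spec_solution solution solution_alt
  rw [foldl_pair
      (fun (acc : List (Int × Int × Int × Int)) p =>
        acc ++ [(p.2.2.1, 1, p.2.1, p.1), (p.2.2.2 + 1, -1, p.2.1, p.1)])
      (fun (acc : List (Int × Int)) p => acc ++ [(p.2.1, p.1)])
      (PySem.List.enumerate rides) [] []]
  rw [PySem.List.foldl_append_eq_flatMap, PySem.List.foldl_append_singleton_eq_map]
  simp only [List.nil_append]
  rcases rides with _ | ⟨r0, rest⟩
  · rfl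
  · apply fold_eq (n := (r0 :: rest).length) (by simp) K
    · intro ev hev
      have hmem := (PySem.List.mem_sorted _ _ _ _).mp hev
      obtain ⟨p, _, hin⟩ := List.mem_flatMap.mp hmem
      simp only [List.mem_cons] at hin
      rcases hin with hin | hin | hin
      · subst hin; left; rfl
      · subst hin; right; rfl
      · simp at hin
    · exact init_inv _
    · exact init_inv _
    · rfl
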